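-- pv_equiv track=rewrite | github.com/dongyun3586/2024_99_Coding_Club | Level 3 챌린저/ex14_징검다리_v1.py | solution
-- ===== SOURCE A (Python) =====
-- def remove_min_rock(rocks):
--     min_idx = 0
--     # 가장 작은 값의 위치 찾기
--     for i in range(1, len(rocks)):
--         if rocks[min_idx] > rocks[i]:
--             min_idx = i
--
--     # 가장 작은 값의 왼쪽 또는 오른쪽 값과 합치기
--     if 0 < min_idx < len(rocks) - 1:    # 중간 요소인 경우
--         if rocks[min_idx-1] < rocks[min_idx+1]:
--             rocks[min_idx-1] = rocks[min_idx-1] + rocks[min_idx]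
--         else:
--             rocks[min_idx + 1] = rocks[min_idx + 1] + rocks[min_idx]
--     elif min_idx == 0:  # 첫번째 요소인 경우
--         rocks[min_idx + 1] = rocks[min_idx + 1] + rocks[min_idx]
--     elif min_idx == len(rocks)-1:   # 마지막 요소인 경우
--         rocks[min_idx - 1] = rocks[min_idx - 1] + rocks[min_idx]
--     del rocks[min_idx]
--
-- def solution(distance, rocks, n):
--     answer = 0
--     rocks = [0] + rocks + [distance]
--     rocks.sort()
--     gaps = []
--     for i in range(1, len(rocks)):
--         gaps.append(rocks[i] - rocks[i-1])
--
--     for _ in range(n):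
--         remove_min_rock(gaps)
--
--     return min(gaps)
-- ===== SOURCE B (Python) =====
-- # B: instead of rescanning the gap list for its minimum each round, keep the gaps as a
-- # chain of (value, id) pairs (ids fixed, increasing along the chain) plus an incrementally
-- # maintained sorted list of those pairs; each round pops the minimal pair from the front,
-- # merges it into the chosen neighbour, and repairs the sorted list with one binary-searched
-- # deletion and one binary-searched insertion (all positions are found by binary search).
-- def solution(distance, rocks, n):
--     pts = sorted([0] + rocks + [distance])
--     chain = [(pts[i + 1] - pts[i], i) for i in range(len(pts) - 1)]
--     order = []
--     for p in chain:
--         order.insert(_bisect(order, p), p)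
--     for _ in range(n):
--         v, i = order.pop(0)              # minimal gap (ids break ties leftward)
--         j = _bisect_id(chain, i)         # its position in the chain (ids are increasing)
--         if 0 < j < len(chain) - 1:
--             k = j - 1 if chain[j - 1][0] < chain[j + 1][0] else j + 1
--         elif j == 0:
--             k = 1
--         else:
--             k = j - 1
--         w, t = chain[k]
--         del order[_bisect(order, (w, t))]
--         chain[k] = (w + v, t)
--         del chain[j]
--         order.insert(_bisect(order, (w + v, t)), (w + v, t))
--     return order[0][0]
--
-- def _bisect(order, item):
--     # first position whose element is not < item (elements are pairwise distinct)
--     lo, hi = 0, len(order)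
--     while lo < hi:
--         mid = (lo + hi) // 2
--         if order[mid] < item:
--             lo = mid + 1
--         else:
--             hi = mid
--     return lo
--
-- def _bisect_id(chain, i):
--     # first position whose id is not < i (ids are strictly increasing)
--     lo, hi = 0, len(chain)
--     while lo < hi:
--         mid = (lo + hi) // 2
--         if chain[mid][1] < i:
--             lo = mid + 1
--         else:
--             hi = mid
--     return lo
-- ===== Notes on version B (the rewrite author's own statement) =====
-- stated objective: faster
-- what changed: A rescans the whole gap list for its minimum on every round; B keeps the gaps as a chain of (value,id) pairs together with an incrementally maintained sorted list of those pairs, pops each round's minimum from the front of that list and repairs it with one binary-searched deletion and one binary-searched insertion, so no scan for a minimum ever happens.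
import Mathlib
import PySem

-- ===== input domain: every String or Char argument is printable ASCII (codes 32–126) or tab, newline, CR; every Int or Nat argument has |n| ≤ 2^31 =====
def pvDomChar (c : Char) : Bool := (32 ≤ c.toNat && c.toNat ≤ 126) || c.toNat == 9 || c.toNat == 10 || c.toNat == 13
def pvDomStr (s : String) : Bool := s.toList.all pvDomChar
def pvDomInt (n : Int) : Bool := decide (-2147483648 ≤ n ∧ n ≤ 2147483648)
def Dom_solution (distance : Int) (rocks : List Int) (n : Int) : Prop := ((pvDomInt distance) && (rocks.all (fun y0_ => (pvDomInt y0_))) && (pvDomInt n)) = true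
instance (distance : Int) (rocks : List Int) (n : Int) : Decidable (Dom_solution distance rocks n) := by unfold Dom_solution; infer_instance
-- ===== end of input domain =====

-- B replaces A's per-round rescan for the minimal gap by a (value,id) chain plus an
-- incrementally maintained sorted list of the pairs (alternative algorithm, same results).
-- A's helper mutates its list argument in Python; only the return value of `solution`
-- is observable to a caller, and that is what is ported and proved equal here.

-- ===== PORT A =====
-- xs[i] for indices the Python code only uses in range (default never read under Pre_)
def pvG (xs : List Int) (i : Int) : Int := PySem.List.pyGetD xs i 0

def removeMinRock (gaps : List Int) : List Int :=
  let minIdx := (PySem.List.pyRange 1 (gaps.length : Int) 1).foldl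
      (fun mi i => if pvG gaps mi > pvG gaps i then i else mi) 0
  let gaps2 :=
    if 0 < minIdx ∧ minIdx < (gaps.length : Int) - 1 then
      (if pvG gaps (minIdx - 1) < pvG gaps (minIdx + 1) then
        PySem.List.pySetD gaps (minIdx - 1) (pvG gaps (minIdx - 1) + pvG gaps minIdx)
      else
        PySem.List.pySetD gaps (minIdx + 1) (pvG gaps (minIdx + 1) + pvG gaps minIdx))
    else if minIdx = 0 then
      PySem.List.pySetD gaps (minIdx + 1) (pvG gaps (minIdx + 1) + pvG gaps minIdx)
    else if minIdx = (gaps.length : Int) - 1 then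
      PySem.List.pySetD gaps (minIdx - 1) (pvG gaps (minIdx - 1) + pvG gaps minIdx)
    else gaps
  gaps2.eraseIdx minIdx.toNat

def solution (distance : Int) (rocks : List Int) (n : Int) : Int :=
  let pts := PySem.List.sorted (0 :: (rocks ++ [distance])) (fun x => x) false
  let gaps := (PySem.List.pyRange 1 (pts.length : Int) 1).foldl
      (fun acc i => acc ++ [pvG pts i - pvG pts (i - 1)]) ([] : List Int)
  let gaps := (PySem.List.pyRange 0 n 1).foldl (fun gs _ => removeMinRock gs) gaps
  (PySem.List.min? gaps (fun x => x)).getD 0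

-- ===== PORT B =====
-- chain[i] for in-range indices (default never read under Pre_)
def pvG2 (xs : List (Int × Int)) (i : Int) : Int × Int := PySem.List.pyGetD xs i (0, 0)

-- Python tuple comparison (v1,i1) < (v2,i2)
def pairLt (a b : Int × Int) : Bool := a.1 < b.1 || (a.1 == b.1 && a.2 < b.2)

-- the binary-search loop of _bisect (fuel bounds the while loop; it starts at hi - lo)
def bisectLoop (order : List (Int × Int)) (item : Int × Int) : Nat → Int → Int → Int
  | 0, lo, _ => lo
  | fuel + 1, lo, hi =>
    if lo < hi then
      let mid := PySem.Int.floordiv (lo + hi) 2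
      if pairLt (pvG2 order mid) item then bisectLoop order item fuel (mid + 1) hi
      else bisectLoop order item fuel lo mid
    else lo

def bisect (order : List (Int × Int)) (item : Int × Int) : Int :=
  bisectLoop order item order.length 0 (order.length : Int)

-- the binary-search loop of _bisect_id
def bisectIdLoop (chain : List (Int × Int)) (i : Int) : Nat → Int → Int → Int
  | 0, lo, _ => lo
  | fuel + 1, lo, hi =>
    if lo < hi then
      let mid := PySem.Int.floordiv (lo + hi) 2
      if (pvG2 chain mid).2 < i then bisectIdLoop chain i fuel (mid + 1) hi
      else bisectIdLoop chain i fuel lo mid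
    else lo

def bisectId (chain : List (Int × Int)) (i : Int) : Int :=
  bisectIdLoop chain i chain.length 0 (chain.length : Int)

def stepB (st : List (Int × Int) × List (Int × Int)) : List (Int × Int) × List (Int × Int) :=
  match PySem.List.pop? st.2 0 with
  | none => st   -- Python raises here (empty order); unreachable under Pre_
  | some (vi, order1) =>
    let chain := st.1
    let j : Int := bisectId chain vi.2
    let k : Int :=
      if 0 < j ∧ j < (chain.length : Int) - 1 then
        (if (pvG2 chain (j - 1)).1 < (pvG2 chain (j + 1)).1 then j - 1 else j + 1)
      else if j = 0 then 1
      else j - 1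
    let wt := pvG2 chain k
    let order2 := order1.eraseIdx (bisect order1 wt).toNat
    let chain2 := (PySem.List.pySetD chain k (wt.1 + vi.1, wt.2)).eraseIdx j.toNat
    (chain2, PySem.List.insert order2 (bisect order2 (wt.1 + vi.1, wt.2)) (wt.1 + vi.1, wt.2))

def solution_alt (distance : Int) (rocks : List Int) (n : Int) : Int :=
  let pts := PySem.List.sorted (0 :: (rocks ++ [distance])) (fun x => x) false
  let chain := (PySem.List.pyRange 0 ((pts.length : Int) - 1) 1).map
      (fun i => (pvG pts (i + 1) - pvG pts i, i))
  let order := chain.foldl (fun acc p => PySem.List.insert acc (bisect acc p) p) []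
  let st := (PySem.List.pyRange 0 n 1).foldl (fun s _ => stepB s) (chain, order)
  (pvG2 st.2 0).1

-- ===== PRECONDITION & SPEC =====
-- A raises IndexError as soon as a merge round starts with a single gap left, i.e. exactly
-- when n > len(rocks); Pre_ excludes only those inputs (A returns on every other input).
def Pre_solution (distance : Int) (rocks : List Int) (n : Int) : Prop :=
  n ≤ (rocks.length : Int)
instance (distance : Int) (rocks : List Int) (n : Int) : Decidable (Pre_solution distance rocks n) := by unfold Pre_solution; infer_instance

def pvWitness_solution : Int × List Int × Int := (25, ([2, 14, 11, 21, 17] : List Int), 2)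

def Spec_solution (distance : Int) (rocks : List Int) (n : Int) (out : Int) : Prop := out = solution_alt distance rocks n
instance (distance : Int) (rocks : List Int) (n : Int) (out : Int) : Decidable (Spec_solution distance rocks n out) := by unfold Spec_solution; infer_instance

-- ===== CLAIM (what is proved, stated in full; the proofs are below) =====
def Claim_equal_solution : Prop := ∀ (distance : Int) (rocks : List Int) (n : Int), Dom_solution distance rocks n → Pre_solution distance rocks n → Spec_solution distance rocks n (solution distance rocks n)

-- ===== LEMMAS AND PROOFS =====

-- strict lexicographic order on pairs, as a Prop
def plt (a b : Int × Int) : Prop := a.1 < b.1 ∨ (a.1 = b.1 ∧ a.2 < b.2)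

lemma pairLt_iff (a b : Int × Int) : pairLt a b = true ↔ plt a b := by
  simp [pairLt, plt]

lemma plt_trans {a b c : Int × Int} (h1 : plt a b) (h2 : plt b c) : plt a c := by
  unfold plt at *; omega

-- the simulation invariant between A's gap list and B's (chain, order) state
def SimInv (gaps : List Int) (st : List (Int × Int) × List (Int × Int)) : Prop :=
  st.1.map Prod.fst = gaps ∧
  (st.1.map Prod.snd).Pairwise (· < ·) ∧
  st.2.Perm st.1 ∧
  st.2.Pairwise plt

lemma foldl_const_iterate {α β : Type} (l : List α) (f : β → β) (init : β) :
    l.foldl (fun s _ => f s) init = f^[l.length] init := by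
  induction l generalizing init with
  | nil => rfl
  | cons x xs ih => simp [List.foldl, ih, Function.iterate_succ_apply]

-- reference functional form of a sorted insertion (proof-side only)
def insertSorted (order : List (Int × Int)) (item : Int × Int) : List (Int × Int) :=
  match order with
  | [] => [item]
  | x :: xs => if pairLt x item then x :: insertSorted xs item else item :: x :: xs

lemma insertSorted_perm (o : List (Int × Int)) (x : Int × Int) :
    (insertSorted o x).Perm (x :: o) := by
  induction o with
  | nil => simp [insertSorted]
  | cons y ys ih =>
    by_cases h : pairLt y x
    · have : (y :: insertSorted ys x).Perm (y :: x :: ys) := ih.cons y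
      simpa [insertSorted, h] using this.trans (List.Perm.swap x y ys)
    · simp [insertSorted, h]

lemma insertSorted_pairwise (o : List (Int × Int)) (x : Int × Int)
    (ho : o.Pairwise plt) (hne : ∀ y ∈ o, y.2 ≠ x.2) :
    (insertSorted o x).Pairwise plt := by
  induction o with
  | nil => simp [insertSorted, plt]
  | cons y ys ih =>
    rcases List.pairwise_cons.mp ho with ⟨hy, hys⟩
    by_cases h : pairLt y x
    · have hyx : plt y x := (pairLt_iff y x).mp h
      have hp := ih hys (fun z hz => hne z (List.mem_cons_of_mem _ hz))
      simp only [insertSorted, h, if_pos]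
      refine List.pairwise_cons.mpr ⟨?_, hp⟩
      intro z hz
      rcases List.mem_cons.mp ((insertSorted_perm ys x).mem_iff.mp hz) with rfl | hzy
      · exact hyx
      · exact hy z hzy
    · have hxy : plt x y := by
        have h2 := hne y (List.mem_cons_self ..)
        simp only [pairLt, Bool.or_eq_true, decide_eq_true_eq, Bool.and_eq_true,
          beq_iff_eq, not_or, not_and] at h
        unfold plt; omega
      simp only [insertSorted, h, if_neg, Bool.false_eq_true, not_false_iff]
      refine List.pairwise_cons.mpr ⟨?_, ho⟩
      intro z hz
      rcases List.mem_cons.mp hz with rfl | hzys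
      · exact hxy
      · exact plt_trans hxy (hy z hzys)

lemma foldl_insertSorted (xs : List (Int × Int)) :
    ∀ acc, acc.Pairwise plt → ((acc ++ xs).map Prod.snd).Nodup →
    (xs.foldl insertSorted acc).Perm (acc ++ xs) ∧ (xs.foldl insertSorted acc).Pairwise plt := by
  induction xs with
  | nil => intro acc h1 _; refine ⟨by simp, h1⟩
  | cons x xs ih =>
    intro acc h1 h2
    have hperm : (insertSorted acc x).Perm (x :: acc) := insertSorted_perm acc x
    have hndl : (acc ++ x :: xs).Nodup := List.Nodup.of_map _ h2
    have hdisj := List.disjoint_of_nodup_append hndl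
    have hne : ∀ y ∈ acc, y.2 ≠ x.2 := by
      intro y hy hyx
      have hxy : y = x :=
        List.inj_on_of_nodup_map h2 (by simp [hy]) (by simp) hyx
      exact hdisj (hxy ▸ hy) (by simp)
    have h1' := insertSorted_pairwise acc x h1 hne
    have hp2 : (insertSorted acc x ++ xs).Perm (acc ++ x :: xs) :=
      (hperm.append_right xs).trans List.perm_middle.symm
    have h2' : ((insertSorted acc x ++ xs).map Prod.snd).Nodup :=
      ((hp2.map Prod.snd).nodup_iff).mpr h2
    obtain ⟨p, q⟩ := ih (insertSorted acc x) h1' h2'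
    exact ⟨p.trans hp2, q⟩

-- ---------- A's argmin fold ----------
def LeftMin (g : List Int) (j : Int) : Prop :=
  0 ≤ j ∧ j < g.length ∧ (∀ k : Int, 0 ≤ k → k < g.length → pvG g j ≤ pvG g k) ∧
  ∀ k : Int, 0 ≤ k → k < j → pvG g j < pvG g k

lemma argmin_aux (g : List Int) : ∀ (c : Nat) (a mi : Int), a + c = g.length →
    0 ≤ mi → mi < a →
    (∀ k : Int, 0 ≤ k → k < a → pvG g mi ≤ pvG g k) →
    (∀ k : Int, 0 ≤ k → k < mi → pvG g mi < pvG g k) →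
    LeftMin g ((PySem.List.pyRange a (g.length : Int) 1).foldl
      (fun mi i => if pvG g mi > pvG g i then i else mi) mi) := by
  intro c
  induction c with
  | zero =>
    intro a mi ha h0 h1 h2 h3
    rw [PySem.List.pyRange_one_eq_nil (by omega)]
    simp only [List.foldl_nil]
    exact ⟨h0, by omega, fun k hk hk' => h2 k hk (by omega), h3⟩
  | succ m ih =>
    intro a mi ha h0 h1 h2 h3
    rw [PySem.List.pyRange_one_cons (by omega)]
    simp only [List.foldl_cons]
    by_cases hc : pvG g mi > pvG g a
    · rw [if_pos hc]
      refine ih (a + 1) a (by omega) (by omega) (by omega) ?_ ?_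
      · intro k hk hk'
        by_cases hka : k = a
        · subst hka; exact le_refl _
        · exact le_of_lt (lt_of_lt_of_le hc (h2 k hk (by omega)))
      · intro k hk hk'
        exact lt_of_lt_of_le hc (h2 k hk (by omega))
    · rw [if_neg hc]
      rw [not_lt] at hc
      refine ih (a + 1) mi (by omega) h0 (by omega) ?_ h3
      intro k hk hk'
      by_cases hka : k = a
      · subst hka; exact hc
      · exact h2 k hk (by omega)

lemma argmin_spec (g : List Int) (h : g ≠ []) :
    LeftMin g ((PySem.List.pyRange 1 (g.length : Int) 1).foldl
      (fun mi i => if pvG g mi > pvG g i then i else mi) 0) := by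
  have hl : 1 ≤ g.length := by cases g with | nil => simp at h | cons a l => simp
  refine argmin_aux g (g.length - 1) 1 0 (by omega) (by omega) (by omega) ?_ (by omega)
  intro k hk hk'
  have : k = 0 := by omega
  subst this; exact le_refl _

lemma leftmin_unique {g : List Int} {j1 j2 : Int} (h1 : LeftMin g j1) (h2 : LeftMin g j2) :
    j1 = j2 := by
  obtain ⟨a1, b1, c1, d1⟩ := h1; obtain ⟨a2, b2, c2, d2⟩ := h2
  rcases lt_trichotomy j1 j2 with h | h | h
  · have t1 := d2 j1 a1 h; have t2 := c1 j2 a2 b2; omega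
  · exact h
  · have t1 := d1 j2 a2 h; have t2 := c2 j1 a1 b1; omega

-- ---------- indexing helpers ----------
lemma pvG_nat (g : List Int) (j : Nat) (h : j < g.length) : pvG g (j : Int) = g[j] := by
  rw [pvG, PySem.List.pyGetD_eq_getElem g 0 (Int.natCast_nonneg j) (by exact_mod_cast h)]
  simp

lemma pvG2_nat (C : List (Int × Int)) (j : Nat) (h : j < C.length) :
    pvG2 C (j : Int) = C[j] := by
  rw [pvG2, PySem.List.pyGetD_eq_getElem C (0, 0) (Int.natCast_nonneg j) (by exact_mod_cast h)]
  simp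

-- nodup erase/set surgery
lemma eraseIdx_eq_erase {α : Type} [BEq α] [LawfulBEq α] :
    ∀ (l : List α) (j : Nat) (h : j < l.length), l.Nodup → l.eraseIdx j = l.erase (l[j]'h) := by
  intro l
  induction l with
  | nil => intro j h; simp at h
  | cons x xs ih =>
    intro j h hnd
    cases j with
    | zero => simp [List.eraseIdx]
    | succ m =>
      have hm : m < xs.length := by simpa using h
      have hx : x ≠ xs[m]'hm := by
        intro he
        exact (List.nodup_cons.mp hnd).1 (he ▸ List.getElem_mem hm)
      simp only [List.eraseIdx_cons_succ, List.getElem_cons_succ]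
      rw [List.erase_cons_tail (by simpa using hx), ih m hm (List.nodup_cons.mp hnd).2]

lemma set_perm {α : Type} [BEq α] [LawfulBEq α] (l : List α) (k : Nat) (h : k < l.length)
    (a : α) (hnd : l.Nodup) :
    (l.set k a).Perm (a :: l.erase (l[k]'h)) := by
  rw [← eraseIdx_eq_erase l k h hnd, List.eraseIdx_eq_take_drop_succ,
      List.set_eq_take_append_cons_drop, if_pos h]
  exact List.perm_middle

-- ---------- the binary searches ----------
lemma bisectLoop_spec (order : List (Int × Int)) (item : Int × Int)
    (hmono : ∀ x y : Int, 0 ≤ x → x ≤ y → y < (order.length : Int) →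
      pairLt (pvG2 order y) item = true → pairLt (pvG2 order x) item = true) :
    ∀ (fuel : Nat) (lo hi : Int), 0 ≤ lo → lo ≤ hi → hi ≤ (order.length : Int) →
    (hi - lo).toNat ≤ fuel →
    (∀ x : Int, 0 ≤ x → x < lo → pairLt (pvG2 order x) item = true) →
    (∀ x : Int, hi ≤ x → x < (order.length : Int) → pairLt (pvG2 order x) item = false) →
    0 ≤ bisectLoop order item fuel lo hi ∧
    bisectLoop order item fuel lo hi ≤ (order.length : Int) ∧
    (∀ x : Int, 0 ≤ x → x < bisectLoop order item fuel lo hi → pairLt (pvG2 order x) item = true) ∧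
    (∀ x : Int, bisectLoop order item fuel lo hi ≤ x → x < (order.length : Int) →
      pairLt (pvG2 order x) item = false) := by
  intro fuel
  induction fuel with
  | zero =>
    intro lo hi h0 h1 h2 h3 h4 h5
    have hle : hi = lo := by omega
    subst hle
    simp only [bisectLoop]
    exact ⟨h0, by omega, fun x hx hx' => h4 x hx hx', fun x hx hx' => h5 x hx hx'⟩
  | succ m ih =>
    intro lo hi h0 h1 h2 h3 h4 h5
    simp only [bisectLoop]
    by_cases hlh : lo < hi
    · rw [if_pos hlh]
      have hmid : lo ≤ PySem.Int.floordiv (lo + hi) 2 ∧ PySem.Int.floordiv (lo + hi) 2 < hi := by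
        show lo ≤ Int.fdiv (lo + hi) 2 ∧ Int.fdiv (lo + hi) 2 < hi
        rw [Int.fdiv_eq_ediv, if_pos (Or.inl (by norm_num))]
        omega
      by_cases hc : pairLt (pvG2 order (PySem.Int.floordiv (lo + hi) 2)) item = true
      · rw [if_pos hc]
        refine ih (PySem.Int.floordiv (lo + hi) 2 + 1) hi (by omega) (by omega) h2 (by omega) ?_ h5
        intro x hx hx'
        exact hmono x (PySem.Int.floordiv (lo + hi) 2) hx (by omega) (by omega) hc
      · rw [if_neg hc]
        refine ih lo (PySem.Int.floordiv (lo + hi) 2) h0 (by omega) (by omega) (by omega) h4 ?_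
        intro x hx hx'
        by_cases hcx : pairLt (pvG2 order x) item = true
        · exact absurd (hmono (PySem.Int.floordiv (lo + hi) 2) x (by omega) hx hx' hcx) hc
        · simpa using hcx
    · rw [if_neg hlh]
      have hle : lo = hi := by omega
      exact ⟨h0, by omega, fun x hx hx' => h4 x hx hx', fun x hx hx' => h5 x (by omega) hx'⟩

lemma bisect_spec (order : List (Int × Int)) (item : Int × Int) (hs : order.Pairwise plt) :
    0 ≤ bisect order item ∧ bisect order item ≤ (order.length : Int) ∧
    (∀ x : Int, 0 ≤ x → x < bisect order item → pairLt (pvG2 order x) item = true) ∧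
    (∀ x : Int, bisect order item ≤ x → x < (order.length : Int) →
      pairLt (pvG2 order x) item = false) := by
  have hmono : ∀ x y : Int, 0 ≤ x → x ≤ y → y < (order.length : Int) →
      pairLt (pvG2 order y) item = true → pairLt (pvG2 order x) item = true := by
    intro x y hx hxy hy hcy
    by_cases hxy' : x = y
    · subst hxy'; exact hcy
    · have hyl : y.toNat < order.length := by omega
      have hplt : plt (order[x.toNat]'(by omega)) (order[y.toNat]'hyl) := by
        have := List.pairwise_iff_getElem.mp hs x.toNat y.toNat (by omega) hyl (by omega)
        exact this
      have h1 : pvG2 order x = order[x.toNat]'(by omega) := by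
        rw [← pvG2_nat order x.toNat (by omega)]
        congr 1
        omega
      have h2 : pvG2 order y = order[y.toNat]'hyl := by
        rw [← pvG2_nat order y.toNat hyl]
        congr 1
        omega
      rw [h1, pairLt_iff]
      rw [h2, pairLt_iff] at hcy
      exact plt_trans hplt hcy
  exact bisectLoop_spec order item hmono order.length 0 (order.length : Int)
    (by omega) (by omega) (by omega) (by omega)
    (fun x hx hx' => absurd hx' (by omega))
    (fun x hx hx' => absurd hx' (by omega))

lemma insertSorted_eq_take_drop : ∀ (order : List (Int × Int)) (item : Int × Int) (r : Nat),
    r ≤ order.length →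
    (∀ (x : Nat) (hx : x < order.length), x < r → pairLt (order[x]'hx) item = true) →
    (∀ (x : Nat) (hx : x < order.length), r ≤ x → pairLt (order[x]'hx) item = false) →
    insertSorted order item = order.take r ++ item :: order.drop r := by
  intro order
  induction order with
  | nil =>
    intro item r hr _ _
    have : r = 0 := by simpa using hr
    subst this
    simp [insertSorted]
  | cons y ys ih =>
    intro item r hr h1 h2
    cases r with
    | zero =>
      have hy := h2 0 (by simp) (by omega)
      simp only [List.getElem_cons_zero] at hy
      simp [insertSorted, hy]
    | succ s =>
      have hy := h1 0 (by simp) (by omega)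
      simp only [List.getElem_cons_zero] at hy
      have h1' : ∀ (x : Nat) (hx : x < ys.length), x < s → pairLt (ys[x]'hx) item = true := by
        intro x hx hxs
        have := h1 (x + 1) (by simpa using Nat.succ_lt_succ hx) (by omega)
        simpa using this
      have h2' : ∀ (x : Nat) (hx : x < ys.length), s ≤ x → pairLt (ys[x]'hx) item = false := by
        intro x hx hxs
        have := h2 (x + 1) (by simpa using Nat.succ_lt_succ hx) (by omega)
        simpa using this
      simp only [insertSorted, hy, if_true, List.take_succ_cons, List.drop_succ_cons,
        List.cons_append]
      rw [ih item s (by simpa using hr) h1' h2']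

lemma posInsert_eq_insertSorted (order : List (Int × Int)) (item : Int × Int)
    (hs : order.Pairwise plt) :
    PySem.List.insert order (bisect order item) item = insertSorted order item := by
  obtain ⟨hb0, hb1, hb2, hb3⟩ := bisect_spec order item hs
  have h1 : ∀ (x : Nat) (hx : x < order.length), x < (bisect order item).toNat →
      pairLt (order[x]'hx) item = true := by
    intro x hx hxr
    have := hb2 (x : Int) (by omega) (by omega)
    rwa [pvG2_nat order x hx] at this
  have h2 : ∀ (x : Nat) (hx : x < order.length), (bisect order item).toNat ≤ x →
      pairLt (order[x]'hx) item = false := by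
    intro x hx hxr
    have := hb3 (x : Int) (by omega) (by omega)
    rwa [pvG2_nat order x hx] at this
  have hcast : bisect order item = (((bisect order item).toNat : Nat) : Int) := by omega
  rw [hcast, PySem.List.insert_natCast order _ item (by omega)]
  exact (insertSorted_eq_take_drop order item (bisect order item).toNat (by omega) h1 h2).symm

lemma posDelete_eq_erase (order : List (Int × Int)) (item : Int × Int)
    (hs : order.Pairwise plt) (hnd : order.Nodup) (hmem : item ∈ order) :
    order.eraseIdx (bisect order item).toNat = order.erase item := by
  obtain ⟨hb0, hb1, hb2, hb3⟩ := bisect_spec order item hs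
  obtain ⟨p, hp, hpval⟩ := List.mem_iff_getElem.mp hmem
  have hirr : pairLt item item = false := by
    simp [pairLt]
  have hrp : ¬ ((p : Int) < bisect order item) := by
    intro hlt
    have := hb2 (p : Int) (by omega) hlt
    rw [pvG2_nat order p hp, hpval, hirr] at this
    simp at this
  have hpr : ¬ (bisect order item < (p : Int)) := by
    intro hlt
    have hrl : (bisect order item).toNat < order.length := by omega
    have hfalse := hb3 (bisect order item) (le_refl _) (by omega)
    have hc : pvG2 order (bisect order item) = order[(bisect order item).toNat]'hrl := by
      rw [← pvG2_nat order (bisect order item).toNat hrl]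
      congr 1
      omega
    rw [hc] at hfalse
    have hplt : plt (order[(bisect order item).toNat]'hrl) (order[p]'hp) :=
      List.pairwise_iff_getElem.mp hs _ p hrl hp (by omega)
    rw [hpval] at hplt
    have := (pairLt_iff _ _).mpr hplt
    rw [this] at hfalse
    simp at hfalse
  have hpeq : (bisect order item).toNat = p := by omega
  rw [hpeq, eraseIdx_eq_erase order p hp hnd, hpval]

lemma bisectIdLoop_spec (chain : List (Int × Int)) (i : Int)
    (hmono : ∀ x y : Int, 0 ≤ x → x ≤ y → y < (chain.length : Int) →
      (pvG2 chain y).2 < i → (pvG2 chain x).2 < i) :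
    ∀ (fuel : Nat) (lo hi : Int), 0 ≤ lo → lo ≤ hi → hi ≤ (chain.length : Int) →
    (hi - lo).toNat ≤ fuel →
    (∀ x : Int, 0 ≤ x → x < lo → (pvG2 chain x).2 < i) →
    (∀ x : Int, hi ≤ x → x < (chain.length : Int) → ¬ ((pvG2 chain x).2 < i)) →
    0 ≤ bisectIdLoop chain i fuel lo hi ∧
    bisectIdLoop chain i fuel lo hi ≤ (chain.length : Int) ∧
    (∀ x : Int, 0 ≤ x → x < bisectIdLoop chain i fuel lo hi → (pvG2 chain x).2 < i) ∧
    (∀ x : Int, bisectIdLoop chain i fuel lo hi ≤ x → x < (chain.length : Int) →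
      ¬ ((pvG2 chain x).2 < i)) := by
  intro fuel
  induction fuel with
  | zero =>
    intro lo hi h0 h1 h2 h3 h4 h5
    have hle : hi = lo := by omega
    subst hle
    simp only [bisectIdLoop]
    exact ⟨h0, by omega, fun x hx hx' => h4 x hx hx', fun x hx hx' => h5 x hx hx'⟩
  | succ m ih =>
    intro lo hi h0 h1 h2 h3 h4 h5
    simp only [bisectIdLoop]
    by_cases hlh : lo < hi
    · rw [if_pos hlh]
      have hmid : lo ≤ PySem.Int.floordiv (lo + hi) 2 ∧ PySem.Int.floordiv (lo + hi) 2 < hi := by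
        show lo ≤ Int.fdiv (lo + hi) 2 ∧ Int.fdiv (lo + hi) 2 < hi
        rw [Int.fdiv_eq_ediv, if_pos (Or.inl (by norm_num))]
        omega
      by_cases hc : (pvG2 chain (PySem.Int.floordiv (lo + hi) 2)).2 < i
      · rw [if_pos hc]
        refine ih (PySem.Int.floordiv (lo + hi) 2 + 1) hi (by omega) (by omega) h2 (by omega) ?_ h5
        intro x hx hx'
        exact hmono x (PySem.Int.floordiv (lo + hi) 2) hx (by omega) (by omega) hc
      · rw [if_neg hc]
        refine ih lo (PySem.Int.floordiv (lo + hi) 2) h0 (by omega) (by omega) (by omega) h4 ?_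
        intro x hx hx' hcx
        exact hc (hmono (PySem.Int.floordiv (lo + hi) 2) x (by omega) hx hx' hcx)
    · rw [if_neg hlh]
      have hle : lo = hi := by omega
      exact ⟨h0, by omega, fun x hx hx' => h4 x hx hx', fun x hx hx' => h5 x (by omega) hx'⟩

lemma bisectId_eq (chain : List (Int × Int)) (i : Int) (j0 : Nat) (hj0 : j0 < chain.length)
    (hsnd : (chain.map Prod.snd).Pairwise (· < ·)) (hval : (chain[j0]'hj0).2 = i) :
    bisectId chain i = (j0 : Int) := by
  have hgetsnd : ∀ (x : Nat) (hx : x < chain.length) (y : Nat) (hy : y < chain.length), x < y →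
      (chain[x]'hx).2 < (chain[y]'hy).2 := by
    intro x hx y hy hxy
    have := List.pairwise_iff_getElem.mp hsnd x y (by simpa) (by simpa) hxy
    simpa using this
  have hmono : ∀ x y : Int, 0 ≤ x → x ≤ y → y < (chain.length : Int) →
      (pvG2 chain y).2 < i → (pvG2 chain x).2 < i := by
    intro x y hx hxy hy hcy
    by_cases he : x = y
    · subst he; exact hcy
    · have h1 : pvG2 chain x = chain[x.toNat]'(by omega) := by
        rw [← pvG2_nat chain x.toNat (by omega)]
        congr 1
        omega
      have h2 : pvG2 chain y = chain[y.toNat]'(by omega) := by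
        rw [← pvG2_nat chain y.toNat (by omega)]
        congr 1
        omega
      rw [h1]
      rw [h2] at hcy
      have := hgetsnd x.toNat (by omega) y.toNat (by omega) (by omega)
      omega
  have hspec := bisectIdLoop_spec chain i hmono chain.length 0 (chain.length : Int)
    (by omega) (by omega) (by omega) (by omega)
    (fun x hx hx' => absurd hx' (by omega))
    (fun x hx hx' => absurd hx' (by omega))
  rw [show bisectIdLoop chain i chain.length 0 (chain.length : Int) = bisectId chain i from rfl]
    at hspec
  obtain ⟨hb0, hb1, hb2, hb3⟩ := hspec
  by_cases hlt : bisectId chain i < (j0 : Int)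
  · exfalso
    have hrl : (bisectId chain i).toNat < chain.length := by omega
    have hfalse := hb3 (bisectId chain i) (le_refl _) (by omega)
    have hc : pvG2 chain (bisectId chain i) = chain[(bisectId chain i).toNat]'hrl := by
      rw [← pvG2_nat chain (bisectId chain i).toNat hrl]
      congr 1
      omega
    rw [hc] at hfalse
    have := hgetsnd (bisectId chain i).toNat hrl j0 hj0 (by omega)
    rw [hval] at this
    exact hfalse this
  · by_cases hgt : (j0 : Int) < bisectId chain i
    · exfalso
      have htrue := hb2 (j0 : Int) (by omega) hgt
      rw [pvG2_nat chain j0 hj0, hval] at htrue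
      omega
    · omega

lemma foldl_posInsert (xs : List (Int × Int)) :
    ∀ acc, acc.Pairwise plt → ((acc ++ xs).map Prod.snd).Nodup →
    xs.foldl (fun acc p => PySem.List.insert acc (bisect acc p) p) acc
      = xs.foldl insertSorted acc := by
  induction xs with
  | nil => intro acc _ _; rfl
  | cons x xs ih =>
    intro acc h1 h2
    rw [List.foldl_cons, List.foldl_cons, posInsert_eq_insertSorted acc x h1]
    have hndl : (acc ++ x :: xs).Nodup := List.Nodup.of_map _ h2
    have hdisj := List.disjoint_of_nodup_append hndl
    have hne : ∀ y ∈ acc, y.2 ≠ x.2 := by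
      intro y hy hyx
      have hxy : y = x :=
        List.inj_on_of_nodup_map h2 (by simp [hy]) (by simp) hyx
      exact hdisj (hxy ▸ hy) (by simp)
    have h1' := insertSorted_pairwise acc x h1 hne
    have hp2 : (insertSorted acc x ++ xs).Perm (acc ++ x :: xs) :=
      ((insertSorted_perm acc x).append_right xs).trans List.perm_middle.symm
    exact ih (insertSorted acc x) h1' (((hp2.map Prod.snd).nodup_iff).mpr h2)

-- ---------- head of the order list is A's leftmost minimum ----------
lemma head_leftmin (gaps : List Int) (C O : List (Int × Int)) (o : Int × Int)
    (tail : List (Int × Int))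
    (hmap : C.map Prod.fst = gaps) (hsnd : (C.map Prod.snd).Pairwise (· < ·))
    (hperm : O.Perm C) (hord : O.Pairwise plt) (hOeq : O = o :: tail) :
    ∃ j0 : Nat, ∃ h : j0 < C.length, (C[j0]'h) = o ∧ LeftMin gaps (j0 : Int) := by
  have hlen : C.length = gaps.length := by rw [← hmap]; simp
  have hoC : o ∈ C := hperm.mem_iff.mp (by simp [hOeq])
  obtain ⟨j0, hj0, hval⟩ := List.mem_iff_getElem.mp hoC
  have hmin : ∀ p ∈ C, p = o ∨ plt o p := by
    intro p hp
    have hpO : p ∈ O := hperm.mem_iff.mpr hp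
    rw [hOeq] at hpO
    rcases List.mem_cons.mp hpO with rfl | hpt
    · exact Or.inl rfl
    · right
      subst hOeq
      exact (List.pairwise_cons.mp hord).1 p hpt
  have hget : ∀ (k : Nat) (hk : k < C.length), gaps[k]'(by omega) = (C[k]'hk).1 := by
    intro k hk
    rw [List.getElem_of_eq hmap.symm, List.getElem_map]
  refine ⟨j0, hj0, hval, by omega, by omega, ?_, ?_⟩
  · intro k hk hkl
    have hkt : k.toNat < C.length := by omega
    rw [pvG_nat gaps j0 (by omega)]
    have hk2 : pvG gaps k = gaps[k.toNat]'(by omega) := by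
      rw [pvG, PySem.List.pyGetD_eq_getElem gaps 0 hk (by omega)]
    rw [hk2, hget j0 hj0, hget k.toNat hkt, hval]
    rcases hmin (C[k.toNat]'hkt) (List.getElem_mem hkt) with he | hlt
    · rw [he]
    · unfold plt at hlt; omega
  · intro k hk hkj
    have hkt : k.toNat < j0 := by omega
    have hktC : k.toNat < C.length := by omega
    rw [pvG_nat gaps j0 (by omega)]
    have hk2 : pvG gaps k = gaps[k.toNat]'(by omega) := by
      rw [pvG, PySem.List.pyGetD_eq_getElem gaps 0 hk (by omega)]
    rw [hk2, hget j0 hj0, hget k.toNat hktC, hval]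
    have hsnd' : (C[k.toNat]'hktC).2 < (C[j0]'hj0).2 := by
      have := List.pairwise_iff_getElem.mp hsnd k.toNat j0 (by simpa) (by simpa) hkt
      simpa using this
    rcases hmin (C[k.toNat]'hktC) (List.getElem_mem hktC) with he | hlt
    · exfalso; rw [he, hval] at hsnd'; omega
    · unfold plt at hlt
      rw [hval] at hsnd'
      omega

lemma pvG_pvG2 (C : List (Int × Int)) (gaps : List Int) (hmap : C.map Prod.fst = gaps)
    (x : Int) (h0 : 0 ≤ x) (h1 : x < C.length) :
    pvG gaps x = (pvG2 C x).1 := by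
  subst hmap
  rw [pvG, pvG2, PySem.List.pyGetD_eq_getElem _ 0 h0 (by simpa using h1),
      PySem.List.pyGetD_eq_getElem _ (0, 0) h0 h1]
  simp

lemma surgery (gaps : List Int) (C : List (Int × Int)) (o : Int × Int)
    (tail : List (Int × Int)) (j0 kt : Nat)
    (hmap : C.map Prod.fst = gaps) (hsnd : (C.map Prod.snd).Pairwise (· < ·))
    (hperm : (o :: tail).Perm C) (hord : (o :: tail).Pairwise plt)
    (hj0 : j0 < C.length) (hkt : kt < C.length) (hne : kt ≠ j0)
    (hCj0 : C[j0]'hj0 = o) :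
    SimInv ((PySem.List.pySetD gaps (kt : Int) (pvG gaps (kt : Int) + pvG gaps (j0 : Int))).eraseIdx j0)
      (((PySem.List.pySetD C (kt : Int) ((pvG2 C (kt : Int)).1 + o.1, (pvG2 C (kt : Int)).2)).eraseIdx j0),
       PySem.List.insert (tail.eraseIdx (bisect tail (pvG2 C (kt : Int))).toNat)
         (bisect (tail.eraseIdx (bisect tail (pvG2 C (kt : Int))).toNat)
           ((pvG2 C (kt : Int)).1 + o.1, (pvG2 C (kt : Int)).2))
         ((pvG2 C (kt : Int)).1 + o.1, (pvG2 C (kt : Int)).2)) := by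
  have hlen : C.length = gaps.length := by rw [← hmap]; simp
  have hwt : pvG2 C (kt : Int) = C[kt]'hkt := pvG2_nat C kt hkt
  have hvk : pvG gaps (kt : Int) = (C[kt]'hkt).1 := by
    rw [pvG_pvG2 C gaps hmap _ (by omega) (by omega), hwt]
  have hvj : pvG gaps (j0 : Int) = o.1 := by
    rw [pvG_pvG2 C gaps hmap _ (by omega) (by omega), pvG2_nat C j0 hj0, hCj0]
  have hndsnd : (C.map Prod.snd).Nodup := hsnd.imp (fun h => ne_of_lt h)
  have hndC : C.Nodup := List.Nodup.of_map _ hndsnd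
  have hsne : (C[kt]'hkt).2 ≠ o.2 := by
    rcases lt_or_gt_of_ne hne with h | h
    · have := List.pairwise_iff_getElem.mp hsnd kt j0 (by simpa) (by simpa) h
      simp only [List.getElem_map] at this
      rw [hCj0] at this; omega
    · have := List.pairwise_iff_getElem.mp hsnd j0 kt (by simpa) (by simpa) h
      simp only [List.getElem_map] at this
      rw [hCj0] at this; omega
  have hwne : (C[kt]'hkt) ≠ o := fun he => hsne (by rw [he])
  have hwC : (C[kt]'hkt) ∈ C := List.getElem_mem hkt
  have hwO : (C[kt]'hkt) ∈ o :: tail := hperm.mem_iff.mpr hwC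
  have hwtail : (C[kt]'hkt) ∈ tail := by
    rcases List.mem_cons.mp hwO with he | h
    · exact absurd he hwne
    · exact h
  have hsetC : PySem.List.pySetD C (kt : Int) ((pvG2 C (kt : Int)).1 + o.1, (pvG2 C (kt : Int)).2)
      = C.set kt ((C[kt]'hkt).1 + o.1, (C[kt]'hkt).2) := by
    rw [hwt, PySem.List.pySetD_of_nonneg C _ (Int.natCast_nonneg kt)]
    simp
  have hC1len : (C.set kt ((C[kt]'hkt).1 + o.1, (C[kt]'hkt).2)).length = C.length := by simp
  have hsnd1 : (C.set kt ((C[kt]'hkt).1 + o.1, (C[kt]'hkt).2)).map Prod.snd = C.map Prod.snd := by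
    rw [List.map_set]
    have he2 : ((C[kt]'hkt).1 + o.1, (C[kt]'hkt).2).2 = (C.map Prod.snd)[kt]'(by simpa) := by
      simp
    rw [he2, List.set_getElem_self]
  have hndC1 : (C.set kt ((C[kt]'hkt).1 + o.1, (C[kt]'hkt).2)).Nodup :=
    List.Nodup.of_map Prod.snd (by rw [hsnd1]; exact hndsnd)
  have hC1j0 : (C.set kt ((C[kt]'hkt).1 + o.1, (C[kt]'hkt).2))[j0]'(by omega) = o := by
    rw [List.getElem_set_ne hne]
    exact hCj0
  have hC2erase : (C.set kt ((C[kt]'hkt).1 + o.1, (C[kt]'hkt).2)).eraseIdx j0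
      = (C.set kt ((C[kt]'hkt).1 + o.1, (C[kt]'hkt).2)).erase o := by
    rw [eraseIdx_eq_erase _ j0 (by omega) hndC1, hC1j0]
  have htailperm : tail.Perm (C.erase o) := by
    have := hperm.erase o
    rwa [List.erase_cons_head] at this
  have hsetperm : (C.set kt ((C[kt]'hkt).1 + o.1, (C[kt]'hkt).2)).Perm
      (((C[kt]'hkt).1 + o.1, (C[kt]'hkt).2) :: C.erase (C[kt]'hkt)) := set_perm C kt hkt _ hndC
  have hnewno : (((C[kt]'hkt).1 + o.1, (C[kt]'hkt).2) : Int × Int) ≠ o := by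
    intro he
    exact hsne (by rw [← he])
  have hC2perm : ((C.set kt ((C[kt]'hkt).1 + o.1, (C[kt]'hkt).2)).eraseIdx j0).Perm
      (((C[kt]'hkt).1 + o.1, (C[kt]'hkt).2) :: ((C.erase o).erase (C[kt]'hkt))) := by
    have e1 : ((((C[kt]'hkt).1 + o.1, (C[kt]'hkt).2)) :: C.erase (C[kt]'hkt)).erase o
        = (((C[kt]'hkt).1 + o.1, (C[kt]'hkt).2)) :: ((C.erase (C[kt]'hkt)).erase o) :=
      List.erase_cons_tail (by simpa using hnewno)
    have e2 : (C.erase (C[kt]'hkt)).erase o = (C.erase o).erase (C[kt]'hkt) :=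
      List.erase_comm _ _
    rw [hC2erase, ← e2, ← e1]
    exact hsetperm.erase o
  have hordtail : tail.Pairwise plt := (List.pairwise_cons.mp hord).2
  have hordtE : (tail.erase (C[kt]'hkt)).Pairwise plt :=
    List.Pairwise.sublist (List.erase_sublist) hordtail
  have hsndsO : ((o :: tail).map Prod.snd).Nodup := ((hperm.map Prod.snd).nodup_iff).mpr hndsnd
  have hndtsnd : (tail.map Prod.snd).Nodup := by
    rw [List.map_cons] at hsndsO
    exact hsndsO.of_cons
  have hndtail : tail.Nodup := List.Nodup.of_map _ hndtsnd
  have hne2 : ∀ y ∈ tail.erase (C[kt]'hkt), y.2 ≠ ((C[kt]'hkt).1 + o.1, (C[kt]'hkt).2).2 := by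
    intro y hy he
    have hyt : y ∈ tail := List.Sublist.subset (List.erase_sublist) hy
    have hywt : y ≠ (C[kt]'hkt) := ((hndtail.mem_erase_iff).mp hy).1
    exact hywt (List.inj_on_of_nodup_map hndtsnd hyt hwtail (by simpa using he))
  have hdel : tail.eraseIdx (bisect tail (C[kt]'hkt)).toNat = tail.erase (C[kt]'hkt) :=
    posDelete_eq_erase tail _ hordtail hndtail hwtail
  have hins : PySem.List.insert (tail.erase (C[kt]'hkt))
      (bisect (tail.erase (C[kt]'hkt)) ((C[kt]'hkt).1 + o.1, (C[kt]'hkt).2))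
      ((C[kt]'hkt).1 + o.1, (C[kt]'hkt).2)
      = insertSorted (tail.erase (C[kt]'hkt)) ((C[kt]'hkt).1 + o.1, (C[kt]'hkt).2) :=
    posInsert_eq_insertSorted _ _ hordtE
  rw [hwt] at hsetC
  rw [hwt]
  refine ⟨?_, ?_, ?_, ?_⟩
  · show _ = _
    rw [hsetC, ← List.eraseIdx_map, List.map_set, hmap,
        PySem.List.pySetD_of_nonneg gaps _ (Int.natCast_nonneg kt)]
    simp only [Int.toNat_natCast]
    congr 2
    rw [hvk, hvj]
  · show List.Pairwise _ _
    rw [hsetC, ← List.eraseIdx_map, hsnd1]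
    exact List.Pairwise.sublist (List.eraseIdx_sublist _ _) hsnd
  · show List.Perm _ _
    rw [hdel, hins, hsetC]
    exact ((insertSorted_perm _ _).trans (((htailperm.erase _).cons _))).trans hC2perm.symm
  · show List.Pairwise _ _
    rw [hdel, hins]
    exact insertSorted_pairwise _ _ hordtE hne2

lemma step_sim (gaps : List Int) (st : List (Int × Int) × List (Int × Int))
    (hInv : SimInv gaps st) (hlen : 2 ≤ gaps.length) :
    SimInv (removeMinRock gaps) (stepB st) ∧
      (removeMinRock gaps).length + 1 = gaps.length := by
  obtain ⟨hmap, hsnd, hperm, hord⟩ := hInv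
  have hlenC : st.1.length = gaps.length := by rw [← hmap]; simp
  obtain ⟨o, tail, hOeq⟩ : ∃ o tail, st.2 = o :: tail := by
    cases hO : st.2 with
    | nil =>
      exfalso
      have := hperm.length_eq
      rw [hO] at this
      simp at this
      omega
    | cons a b => exact ⟨a, b, rfl⟩
  obtain ⟨j0, hj0, hCj0, hLM⟩ := head_leftmin gaps st.1 st.2 o tail hmap hsnd hperm hord hOeq
  have hgne : gaps ≠ [] := by
    intro h
    rw [h] at hlen
    simp at hlen
  have hmin : ((PySem.List.pyRange 1 (gaps.length : Int) 1).foldl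
      (fun mi i => if pvG gaps mi > pvG gaps i then i else mi) 0) = (j0 : Int) :=
    leftmin_unique (argmin_spec gaps hgne) hLM
  have hfind : bisectId st.1 o.2 = (j0 : Int) := bisectId_eq st.1 o.2 j0 hj0 hsnd (by rw [hCj0])
  have hperm' : (o :: tail).Perm st.1 := hOeq ▸ hperm
  have hord' : (o :: tail).Pairwise plt := hOeq ▸ hord
  have hj0' : (0:Int) ≤ (j0 : Int) := Int.natCast_nonneg j0
  have hLlen : st.1.length = gaps.length := hlenC
  -- case analysis on the merge target
  by_cases hmid : 0 < (j0 : Int) ∧ (j0 : Int) < (gaps.length : Int) - 1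
  · by_cases hlr : pvG gaps ((j0 : Int) - 1) < pvG gaps ((j0 : Int) + 1)
    · -- merge into the left neighbour: kt = j0 - 1
      have hkt : j0 - 1 < st.1.length := by omega
      have hcast : ((j0 : Int) - 1) = ((j0 - 1 : Nat) : Int) := by omega
      have hlr' : (pvG2 st.1 ((j0 : Int) - 1)).1 < (pvG2 st.1 ((j0 : Int) + 1)).1 := by
        rw [← pvG_pvG2 st.1 gaps hmap _ (by omega) (by omega),
            ← pvG_pvG2 st.1 gaps hmap _ (by omega) (by omega)]
        exact hlr
      have hA : removeMinRock gaps =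
          (PySem.List.pySetD gaps ((j0 - 1 : Nat) : Int)
            (pvG gaps ((j0 - 1 : Nat) : Int) + pvG gaps (j0 : Int))).eraseIdx j0 := by
        simp only [removeMinRock, hmin]
        rw [if_pos hmid, if_pos hlr, ← hcast]
        simp
      have hB : stepB st =
          (((PySem.List.pySetD st.1 ((j0 - 1 : Nat) : Int)
              ((pvG2 st.1 ((j0 - 1 : Nat) : Int)).1 + o.1, (pvG2 st.1 ((j0 - 1 : Nat) : Int)).2)).eraseIdx j0),
           PySem.List.insert (tail.eraseIdx (bisect tail (pvG2 st.1 ((j0 - 1 : Nat) : Int))).toNat)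
             (bisect (tail.eraseIdx (bisect tail (pvG2 st.1 ((j0 - 1 : Nat) : Int))).toNat)
               ((pvG2 st.1 ((j0 - 1 : Nat) : Int)).1 + o.1, (pvG2 st.1 ((j0 - 1 : Nat) : Int)).2))
             ((pvG2 st.1 ((j0 - 1 : Nat) : Int)).1 + o.1, (pvG2 st.1 ((j0 - 1 : Nat) : Int)).2)) := by
        simp only [stepB, hOeq, PySem.List.pop?_zero_cons, hfind, hlenC]
        rw [if_pos hmid, if_pos hlr', ← hcast]
        simp
      rw [hA, hB]
      refine ⟨surgery gaps st.1 o tail j0 (j0 - 1) hmap hsnd hperm' hord' hj0 hkt (by omega) hCj0, ?_⟩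
      rw [List.length_eraseIdx]
      simp only [PySem.List.length_pySetD]
      rw [if_pos (by omega)]
      omega
    · -- merge into the right neighbour: kt = j0 + 1
      have hkt : j0 + 1 < st.1.length := by omega
      have hcast : ((j0 : Int) + 1) = ((j0 + 1 : Nat) : Int) := by omega
      have hlr' : ¬ (pvG2 st.1 ((j0 : Int) - 1)).1 < (pvG2 st.1 ((j0 : Int) + 1)).1 := by
        rw [← pvG_pvG2 st.1 gaps hmap _ (by omega) (by omega),
            ← pvG_pvG2 st.1 gaps hmap _ (by omega) (by omega)]
        exact hlr
      have hA : removeMinRock gaps =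
          (PySem.List.pySetD gaps ((j0 + 1 : Nat) : Int)
            (pvG gaps ((j0 + 1 : Nat) : Int) + pvG gaps (j0 : Int))).eraseIdx j0 := by
        simp only [removeMinRock, hmin]
        rw [if_pos hmid, if_neg hlr, ← hcast]
        simp
      have hB : stepB st =
          (((PySem.List.pySetD st.1 ((j0 + 1 : Nat) : Int)
              ((pvG2 st.1 ((j0 + 1 : Nat) : Int)).1 + o.1, (pvG2 st.1 ((j0 + 1 : Nat) : Int)).2)).eraseIdx j0),
           PySem.List.insert (tail.eraseIdx (bisect tail (pvG2 st.1 ((j0 + 1 : Nat) : Int))).toNat)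
             (bisect (tail.eraseIdx (bisect tail (pvG2 st.1 ((j0 + 1 : Nat) : Int))).toNat)
               ((pvG2 st.1 ((j0 + 1 : Nat) : Int)).1 + o.1, (pvG2 st.1 ((j0 + 1 : Nat) : Int)).2))
             ((pvG2 st.1 ((j0 + 1 : Nat) : Int)).1 + o.1, (pvG2 st.1 ((j0 + 1 : Nat) : Int)).2)) := by
        simp only [stepB, hOeq, PySem.List.pop?_zero_cons, hfind, hlenC]
        rw [if_pos hmid, if_neg hlr', ← hcast]
        simp
      rw [hA, hB]
      refine ⟨surgery gaps st.1 o tail j0 (j0 + 1) hmap hsnd hperm' hord' hj0 hkt (by omega) hCj0, ?_⟩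
      rw [List.length_eraseIdx]
      simp only [PySem.List.length_pySetD]
      rw [if_pos (by omega)]
      omega
  · by_cases hz : (j0 : Int) = 0
    · -- first element: kt = 1
      have hkt : 1 < st.1.length := by omega
      have hcast : ((j0 : Int) + 1) = ((1 : Nat) : Int) := by omega
      have hA : removeMinRock gaps =
          (PySem.List.pySetD gaps ((1 : Nat) : Int)
            (pvG gaps ((1 : Nat) : Int) + pvG gaps (j0 : Int))).eraseIdx j0 := by
        simp only [removeMinRock, hmin]
        rw [if_neg hmid, if_pos hz, ← hcast]
        simp
      have hB : stepB st =
          (((PySem.List.pySetD st.1 ((1 : Nat) : Int)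
              ((pvG2 st.1 ((1 : Nat) : Int)).1 + o.1, (pvG2 st.1 ((1 : Nat) : Int)).2)).eraseIdx j0),
           PySem.List.insert (tail.eraseIdx (bisect tail (pvG2 st.1 ((1 : Nat) : Int))).toNat)
             (bisect (tail.eraseIdx (bisect tail (pvG2 st.1 ((1 : Nat) : Int))).toNat)
               ((pvG2 st.1 ((1 : Nat) : Int)).1 + o.1, (pvG2 st.1 ((1 : Nat) : Int)).2))
             ((pvG2 st.1 ((1 : Nat) : Int)).1 + o.1, (pvG2 st.1 ((1 : Nat) : Int)).2)) := by
        simp only [stepB, hOeq, PySem.List.pop?_zero_cons, hfind, hlenC]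
        rw [if_neg hmid, if_pos hz]
        simp only [Nat.cast_one]
        have : (j0 : Int).toNat = j0 := by omega
        simp [this]
      rw [hA, hB]
      refine ⟨surgery gaps st.1 o tail j0 1 hmap hsnd hperm' hord' hj0 hkt (by omega) hCj0, ?_⟩
      rw [List.length_eraseIdx]
      simp only [PySem.List.length_pySetD]
      rw [if_pos (by omega)]
      omega
    · -- last element: kt = j0 - 1, and A's third guard j0 = len - 1 holds
      have hlast : (j0 : Int) = (gaps.length : Int) - 1 := by omega
      have hkt : j0 - 1 < st.1.length := by omega
      have hcast : ((j0 : Int) - 1) = ((j0 - 1 : Nat) : Int) := by omega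
      have hA : removeMinRock gaps =
          (PySem.List.pySetD gaps ((j0 - 1 : Nat) : Int)
            (pvG gaps ((j0 - 1 : Nat) : Int) + pvG gaps (j0 : Int))).eraseIdx j0 := by
        simp only [removeMinRock, hmin]
        rw [if_neg hmid, if_neg hz, if_pos hlast, ← hcast]
        simp
      have hB : stepB st =
          (((PySem.List.pySetD st.1 ((j0 - 1 : Nat) : Int)
              ((pvG2 st.1 ((j0 - 1 : Nat) : Int)).1 + o.1, (pvG2 st.1 ((j0 - 1 : Nat) : Int)).2)).eraseIdx j0),
           PySem.List.insert (tail.eraseIdx (bisect tail (pvG2 st.1 ((j0 - 1 : Nat) : Int))).toNat)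
             (bisect (tail.eraseIdx (bisect tail (pvG2 st.1 ((j0 - 1 : Nat) : Int))).toNat)
               ((pvG2 st.1 ((j0 - 1 : Nat) : Int)).1 + o.1, (pvG2 st.1 ((j0 - 1 : Nat) : Int)).2))
             ((pvG2 st.1 ((j0 - 1 : Nat) : Int)).1 + o.1, (pvG2 st.1 ((j0 - 1 : Nat) : Int)).2)) := by
        simp only [stepB, hOeq, PySem.List.pop?_zero_cons, hfind, hlenC]
        rw [if_neg hmid, if_neg hz, ← hcast]
        simp
      rw [hA, hB]
      refine ⟨surgery gaps st.1 o tail j0 (j0 - 1) hmap hsnd hperm' hord' hj0 hkt (by omega) hCj0, ?_⟩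
      rw [List.length_eraseIdx]
      simp only [PySem.List.length_pySetD]
      rw [if_pos (by omega)]
      omega

lemma init_sim (pts : List Int) :
    SimInv ((PySem.List.pyRange 1 (pts.length : Int) 1).foldl
          (fun acc i => acc ++ [pvG pts i - pvG pts (i - 1)]) ([] : List Int))
        (((PySem.List.pyRange 0 ((pts.length : Int) - 1) 1).map
            (fun i => (pvG pts (i + 1) - pvG pts i, i))),
         ((PySem.List.pyRange 0 ((pts.length : Int) - 1) 1).map
            (fun i => (pvG pts (i + 1) - pvG pts i, i))).foldl
              (fun acc p => PySem.List.insert acc (bisect acc p) p) []) := by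
  have hsndid : ((PySem.List.pyRange 0 ((pts.length : Int) - 1) 1).map
      (fun i => (pvG pts (i + 1) - pvG pts i, i))).map Prod.snd
      = PySem.List.pyRange 0 ((pts.length : Int) - 1) 1 := by
    rw [List.map_map]
    simp only [Function.comp_def]
    exact List.map_id' _
  have hsnd : (((PySem.List.pyRange 0 ((pts.length : Int) - 1) 1).map
      (fun i => (pvG pts (i + 1) - pvG pts i, i))).map Prod.snd).Pairwise (· < ·) := by
    rw [hsndid]
    exact PySem.List.pairwise_lt_pyRange_one 0 ((pts.length : Int) - 1)
  have hnd : ((([] : List (Int × Int)) ++ (PySem.List.pyRange 0 ((pts.length : Int) - 1) 1).map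
      (fun i => (pvG pts (i + 1) - pvG pts i, i))).map Prod.snd).Nodup := by
    rw [List.nil_append, hsndid]
    exact PySem.List.nodup_pyRange_one 0 ((pts.length : Int) - 1)
  obtain ⟨hp, hq⟩ := foldl_insertSorted
    ((PySem.List.pyRange 0 ((pts.length : Int) - 1) 1).map
      (fun i => (pvG pts (i + 1) - pvG pts i, i))) [] (by simp) hnd
  have hpos := foldl_posInsert
    ((PySem.List.pyRange 0 ((pts.length : Int) - 1) 1).map
      (fun i => (pvG pts (i + 1) - pvG pts i, i))) [] (by simp) hnd
  rw [show (((PySem.List.pyRange 0 ((pts.length : Int) - 1) 1).map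
      (fun i => (pvG pts (i + 1) - pvG pts i, i))).foldl
        (fun acc p => PySem.List.insert acc (bisect acc p) p) []) = _ from hpos]
  refine ⟨?_, hsnd, by simpa using hp, hq⟩
  show _ = _
  rw [PySem.List.foldl_append_singleton_eq_map (fun i => pvG pts i - pvG pts (i - 1))]
  rw [List.nil_append, List.map_map, PySem.List.pyRange_one, PySem.List.pyRange_one, List.map_map, List.map_map]
  have hlen : ((pts.length : Int) - 1 - 0).toNat = ((pts.length : Int) - 1).toNat := by
    norm_num
  rw [hlen]
  refine List.map_congr_left ?_
  intro k hk
  simp only [Function.comp_apply]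
  have e1 : (0 : Int) + (k : Int) + 1 = 1 + (k : Int) := by ring
  have e2 : (0 : Int) + (k : Int) = 1 + (k : Int) - 1 := by ring
  rw [e1, e2]

lemma final_sim (gaps : List Int) (st : List (Int × Int) × List (Int × Int))
    (hInv : SimInv gaps st) (hne : gaps ≠ []) :
    (PySem.List.min? gaps (fun x => x)).getD 0 = (pvG2 st.2 0).1 := by
  obtain ⟨hmap, hsnd, hperm, hord⟩ := hInv
  cases hO : st.2 with
  | nil =>
    exfalso
    have hl := hperm.length_eq
    rw [hO] at hl
    simp at hl
    apply hne
    rw [← hmap]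
    rw [List.eq_nil_of_length_eq_zero hl.symm]
    rfl
  | cons o tail =>
    have hoC : o ∈ st.1 := hperm.mem_iff.mp (by simp [hO])
    have ho1 : o.1 ∈ gaps := by
      rw [← hmap]
      exact List.mem_map_of_mem hoC
    obtain ⟨m, hm⟩ : ∃ m, PySem.List.min? gaps (fun x => x) = some m := by
      cases hmin : PySem.List.min? gaps (fun x => x) with
      | none => exact absurd ((PySem.List.min?_eq_none_iff _ _).mp hmin) hne
      | some m => exact ⟨m, rfl⟩
    have hmmem := PySem.List.min?_mem hm
    have hmin1 := PySem.List.min?_isMin hm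
    have hole : ∀ y ∈ gaps, o.1 ≤ y := by
      intro y hy
      rw [← hmap] at hy
      obtain ⟨p, hp, rfl⟩ := List.mem_map.mp hy
      have hpO : p ∈ st.2 := hperm.mem_iff.mpr hp
      rw [hO] at hpO
      rcases List.mem_cons.mp hpO with rfl | hpt
      · exact le_refl _
      · have := (List.pairwise_cons.mp (hO ▸ hord)).1 p hpt
        unfold plt at this
        omega
    have h1 := hmin1 o.1 ho1
    have h2 := hole m hmmem
    rw [hm]
    have : pvG2 (o :: tail) 0 = o := by
      rw [pvG2]
      exact PySem.List.pyGetD_zero_cons ..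
    rw [this]
    simp only [Option.getD_some]
    omega

lemma loop_sim (k : Nat) (gaps : List Int) (st : List (Int × Int) × List (Int × Int))
    (hInv : SimInv gaps st) (hk : k + 1 ≤ gaps.length) :
    SimInv (removeMinRock^[k] gaps) (stepB^[k] st) ∧
      (removeMinRock^[k] gaps).length + k = gaps.length := by
  induction k generalizing gaps st with
  | zero => simpa using hInv
  | succ m ih =>
    have h2 : 2 ≤ gaps.length := by omega
    obtain ⟨hInv', hlen'⟩ := step_sim gaps st hInv h2
    have hres := ih (removeMinRock gaps) (stepB st) hInv' (by omega)
    constructor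
    · simpa [Function.iterate_succ_apply] using hres.1
    · have := hres.2
      simp only [Function.iterate_succ_apply]
      omega

-- ===== VERDICT (by name: the statement is the Claim_ definition above) =====
theorem solution_spec : Claim_equal_solution := by
  intro distance rocks n _ hpre
  unfold Pre_solution at hpre
  simp only [Spec_solution, solution, solution_alt]
  set pts := PySem.List.sorted (0 :: (rocks ++ [distance])) (fun x => x) false with hpts
  set gaps0 := (PySem.List.pyRange 1 (pts.length : Int) 1).foldl
      (fun acc i => acc ++ [pvG pts i - pvG pts (i - 1)]) ([] : List Int) with hg0
  set chain0 := (PySem.List.pyRange 0 ((pts.length : Int) - 1) 1).map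
      (fun i => (pvG pts (i + 1) - pvG pts i, i)) with hc0
  set order0 := chain0.foldl (fun acc p => PySem.List.insert acc (bisect acc p) p) [] with ho0
  have hptsLen : pts.length = rocks.length + 2 := by
    rw [hpts, PySem.List.length_sorted]
    simp
  have hg0len : gaps0.length = rocks.length + 1 := by
    rw [hg0, PySem.List.foldl_append_singleton_eq_map (fun i => pvG pts i - pvG pts (i - 1))]
    simp only [List.nil_append, List.length_map, PySem.List.length_pyRange_one, hptsLen]
    omega
  have hInv0 : SimInv gaps0 (chain0, order0) := init_sim pts
  obtain ⟨hInvF, hlenF⟩ := loop_sim n.toNat gaps0 (chain0, order0) hInv0 (by omega)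
  have hlA : (PySem.List.pyRange 0 n 1).foldl (fun gs _ => removeMinRock gs) gaps0
      = removeMinRock^[n.toNat] gaps0 := by
    rw [foldl_const_iterate]
    congr 1
    rw [PySem.List.length_pyRange_one]
    omega
  have hlB : (PySem.List.pyRange 0 n 1).foldl (fun s _ => stepB s) (chain0, order0)
      = stepB^[n.toNat] (chain0, order0) := by
    rw [foldl_const_iterate]
    congr 1
    rw [PySem.List.length_pyRange_one]
    omega
  rw [hlA, hlB]
  exact final_sim _ _ hInvF (by
    intro he
    rw [he] at hlenF
    simp at hlenF
    omega)
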